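-- pv_equiv track=rewrite | github.com/Syahlnl/practice_2.1 | task_10.py | _escape_xml
-- ===== SOURCE A (Python) =====
-- def _escape_xml(text: str) -> str:
--     """Замена специальных символов на XML-сущности."""
--     replacements = {
--         "&": "&amp;",
--         "<": "&lt;",
--         ">": "&gt;",
--         '"': "&quot;",
--         "'": "&apos;"
--     }
--     for char, entity in replacements.items():
--         text = text.replace(char, entity)
--     return text
-- ===== SOURCE B (Python) =====
-- def _escape_xml(text: str) -> str:
--     """Замена специальных символов на XML-сущности."""
--     out = []
--     for ch in text:
--         if ch == '&':
--             out.append('&amp;')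
--         elif ch == '<':
--             out.append('&lt;')
--         elif ch == '>':
--             out.append('&gt;')
--         elif ch == '"':
--             out.append('&quot;')
--         elif ch == "'":
--             out.append('&apos;')
--         else:
--             out.append(ch)
--     return ''.join(out)
-- ===== Notes on version B (the rewrite author's own statement) =====
-- stated objective: alternative
-- what changed: B drops the replacements dict and the five whole-string replace passes: a single loop over the characters with an if/elif chain appends each character's entity (or the character) to an accumulator list, joined once at the end.
import Mathlib
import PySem

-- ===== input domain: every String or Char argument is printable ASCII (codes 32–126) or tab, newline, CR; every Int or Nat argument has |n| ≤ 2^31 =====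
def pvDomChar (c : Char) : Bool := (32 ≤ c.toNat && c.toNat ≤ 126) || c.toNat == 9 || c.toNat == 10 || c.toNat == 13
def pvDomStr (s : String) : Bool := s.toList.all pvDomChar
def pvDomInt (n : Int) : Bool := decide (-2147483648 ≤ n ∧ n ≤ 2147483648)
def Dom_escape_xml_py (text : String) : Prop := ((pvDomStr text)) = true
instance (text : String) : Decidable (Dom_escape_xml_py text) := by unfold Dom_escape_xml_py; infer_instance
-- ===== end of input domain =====

-- B replaces A's replacements dict and its five whole-string replace passes by one loop
-- over the characters with an if/elif chain and an accumulator list, joined once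
-- (objective: alternative decomposition, same result).

-- ===== PORT A =====
-- A: a replacements dict, then one text.replace(char, entity) pass per entry, in order.
def escape_xml_py (text : String) : String :=
  let replacements : PySem.Dict String String := PySem.Dict.ofList
    [("&", "&amp;"), ("<", "&lt;"), (">", "&gt;"), ("\"", "&quot;"), ("'", "&apos;")]
  replacements.items.foldl (fun t p => PySem.Str.replace t p.1 p.2) text

-- ===== PORT B =====
-- B helper: the if/elif chain of the loop body, giving the piece appended for one char.
def pvEnt (ch : Char) : String :=
  if ch = '&' then "&amp;"
  else if ch = '<' then "&lt;"
  else if ch = '>' then "&gt;"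
  else if ch = '"' then "&quot;"
  else if ch = '\'' then "&apos;"
  else String.ofList [ch]

-- B: loop over the characters appending pvEnt ch to an accumulator list, join at the end.
def escape_xml_py_alt (text : String) : String :=
  PySem.Str.join "" (text.toList.foldl (fun out ch => out ++ [pvEnt ch]) [])

-- ===== PRECONDITION & SPEC =====
def Spec_escape_xml_py (text : String) (out : String) : Prop := out = escape_xml_py_alt text
instance (text : String) (out : String) : Decidable (Spec_escape_xml_py text out) := by unfold Spec_escape_xml_py; infer_instance

-- ===== CLAIM (what is proved, stated in full; the proofs are below) =====
def Claim_equal_escape_xml_py : Prop := ∀ (text : String), Dom_escape_xml_py text → Spec_escape_xml_py text (escape_xml_py text)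

-- ===== LEMMAS AND PROOFS =====

-- per-character replacement for a single-character pattern
def pvRep (a : Char) (new : List Char) (c : Char) : List Char :=
  if c = a then new else [c]

theorem pvGo_single (a : Char) (new : List Char) :
    ∀ (fuel : Nat) (l acc : List Char), l.length ≤ fuel →
      PySem.Chars.replace.go [a] new fuel l acc
        = acc.reverse ++ l.flatMap (pvRep a new) := by
  intro fuel
  induction fuel with
  | zero =>
    intro l acc h
    have : l = [] := List.length_eq_zero_iff.mp (Nat.le_zero.mp h)
    subst this
    rw [PySem.Chars.replace.go.eq_def]
    simp
  | succ n ih =>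
    intro l acc h
    cases l with
    | nil => rw [PySem.Chars.replace.go.eq_def]; simp
    | cons c t =>
      rw [PySem.Chars.replace.go.eq_def]
      simp only [List.isPrefixOf, List.length_cons] at *
      by_cases hca : a = c
      · subst hca
        simp only [beq_self_eq_true, Bool.true_and, if_true]
        have hd : List.drop (([] : List Char).length + 1) (a :: t) = t := rfl
        rw [hd, ih t _ (Nat.le_of_succ_le_succ h)]
        simp [pvRep, List.flatMap_cons]
      · have : (a == c) = false := beq_eq_false_iff_ne.mpr hca
        simp only [this, Bool.false_and, Bool.false_eq_true, if_false]
        rw [ih t _ (Nat.le_of_succ_le_succ h)]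
        have : c ≠ a := fun h' => hca h'.symm
        simp [pvRep, List.flatMap_cons, this]

theorem pvReplace_single (a : Char) (new l : List Char) :
    PySem.Chars.replace l [a] new = l.flatMap (pvRep a new) := by
  unfold PySem.Chars.replace
  simp only [List.isEmpty_cons, if_false, Bool.false_eq_true]
  rw [pvGo_single a new l.length l [] (Nat.le_refl _)]
  simp

-- ''.join over the list of chunks is flatten
theorem pvJoin_nil_eq_flatten : ∀ (parts : List (List Char)),
    PySem.Chars.join [] parts = parts.flatten := by
  intro parts
  induction parts with
  | nil => simp [PySem.Chars.join, List.intercalate]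
  | cons p rest ih =>
    cases rest with
    | nil => simp [PySem.Chars.join, List.intercalate]
    | cons q r =>
      rw [PySem.Chars.join_cons_cons, ih]
      simp

-- B's accumulator loop is the map of the loop body over the characters
theorem pvFoldl_append_map {α β : Type} (f : α → β) :
    ∀ (l : List α) (acc : List β),
      l.foldl (fun out ch => out ++ [f ch]) acc = acc ++ l.map f := by
  intro l
  induction l with
  | nil => intro acc; simp
  | cons c t ih => intro acc; simp [List.foldl_cons, ih]

-- the five successive single-char replacements, composed per character, give pvEnt
theorem pvCompose (c : Char) :
    ((((pvRep '&' "&amp;".toList c).flatMap (pvRep '<' "&lt;".toList)).flatMap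
        (pvRep '>' "&gt;".toList)).flatMap
        (pvRep '"' "&quot;".toList)).flatMap (pvRep '\'' "&apos;".toList)
      = (pvEnt c).toList := by
  by_cases h1 : c = '&'
  · subst h1; decide
  by_cases h2 : c = '<'
  · subst h2; decide
  by_cases h3 : c = '>'
  · subst h3; decide
  by_cases h4 : c = '"'
  · subst h4; decide
  by_cases h5 : c = '\''
  · subst h5; decide
  simp [pvRep, pvEnt, h1, h2, h3, h4, h5]

-- ===== VERDICT (by name: the statement is the Claim_ definition above) =====
theorem escape_xml_py_spec : Claim_equal_escape_xml_py := by
  intro text _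
  unfold Spec_escape_xml_py escape_xml_py escape_xml_py_alt
  apply String.toList_inj.mp
  simp only []
  have hitA : (PySem.Dict.ofList
      [("&", "&amp;"), ("<", "&lt;"), (">", "&gt;"), ("\"", "&quot;"), ("'", "&apos;")]).items
      = [("&", "&amp;"), ("<", "&lt;"), (">", "&gt;"), ("\"", "&quot;"), ("'", "&apos;")] := by
    decide
  rw [hitA, pvFoldl_append_map]
  have hnil : "".toList = ([] : List Char) := rfl
  simp only [List.foldl_cons, List.foldl_nil, PySem.Str.toList_replace,
    PySem.Str.toList_join, List.map_map, List.nil_append, hnil]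
  rw [pvJoin_nil_eq_flatten]
  have hs : "&".toList = ['&'] := rfl
  have hl : "<".toList = ['<'] := rfl
  have hg : ">".toList = ['>'] := rfl
  have hq : "\"".toList = ['"'] := rfl
  have ha : "'".toList = ['\''] := rfl
  rw [hs, hl, hg, hq, ha]
  rw [pvReplace_single, pvReplace_single, pvReplace_single, pvReplace_single, pvReplace_single]
  simp only [List.flatMap_assoc]
  rw [List.flatten_eq_flatMap, List.flatMap_map]
  apply List.flatMap_congr
  intro c _
  simp only [← List.flatMap_assoc, id_eq, Function.comp_apply]
  exact pvCompose c
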